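-- pv_equiv track=rewrite | github.com/moongni/Algorithm | bruteforce/picnic.py | picnic
-- ===== SOURCE A (Python) =====
-- def picnic(friend_list, case):
--     ret = 0
--
--     if len(friend_list) == 0:
--         return 1
--
--     if len(case) == 0:
--         return 0
--
--     for i in range(0, len(case), 2):
--         if case[i] in friend_list and case[i + 1] in friend_list:
--             ret += picnic(list(set(friend_list) - {case[i], case[i + 1]}), case[i + 2: ])
--
--     return ret
-- ===== SOURCE B (Python) =====
-- def picnic(friend_list, case):
--     # Iterative subset DP: one pass over the pairs, keeping a dict from the set
--     # of still-unmatched friends (as a sorted tuple) to the number of ways to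
--     # reach that state; the answer is the count for the empty state.
--     pairs = [(case[i], case[i + 1]) for i in range(0, len(case) - 1, 2)]
--     states = {tuple(sorted(set(friend_list))): 1}
--     for a, b in pairs:
--         new = {}
--         for s, c in states.items():
--             new[s] = new.get(s, 0) + c
--             if a in s and b in s:
--                 t = tuple(x for x in s if x != a and x != b)
--                 new[t] = new.get(t, 0) + c
--         states = new
--     return states.get((), 0)
-- ===== Notes on version B (the rewrite author's own statement) =====
-- stated objective: alternative
-- what changed: A's branching recursion over all later pair positions (re-exploring each partial matching) is replaced by a single left-to-right pass over the pairs that maintains a dict from each reachable set of unmatched friends to its number of derivations, reading off the count for the empty set at the end.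
import Mathlib
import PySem

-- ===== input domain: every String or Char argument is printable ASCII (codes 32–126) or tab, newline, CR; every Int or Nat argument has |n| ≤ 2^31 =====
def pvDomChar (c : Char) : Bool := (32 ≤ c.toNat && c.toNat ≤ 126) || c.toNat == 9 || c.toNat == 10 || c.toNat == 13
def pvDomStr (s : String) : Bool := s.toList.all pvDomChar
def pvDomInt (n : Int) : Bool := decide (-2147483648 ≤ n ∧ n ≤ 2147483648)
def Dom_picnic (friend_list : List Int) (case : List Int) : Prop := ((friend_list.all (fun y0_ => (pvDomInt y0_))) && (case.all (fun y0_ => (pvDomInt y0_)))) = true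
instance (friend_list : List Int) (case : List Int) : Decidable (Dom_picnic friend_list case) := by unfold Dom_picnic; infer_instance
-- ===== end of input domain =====

-- B replaces A's branching recursion over pair choices by a single left-to-right pass
-- over the pairs that maintains a dict from each reachable set of unmatched friends to
-- its number of derivations (objective: alternative algorithm; equivalence is about the
-- return value only).

-- ===== PORT A =====
-- 'for i in range(0, len(case), 2)' with the running sum 'ret' is picnicLoop;
-- case[i+2:] is List.drop (i+2) (exact: the start is nonnegative); case[i]/case[i+1]
-- are read with getD (i is in range; i+1 can be out of range only where Python raises
-- IndexError — those inputs are excluded by Pre_picnic);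
-- list(set(friend_list) - {case[i], case[i+1]}) is PySem.Set.diff (PySem.Set.ofList …).
mutual
def picnic (friend_list : List Int) (case : List Int) : Int :=
  if friend_list.length = 0 then 1
  else if case.length = 0 then 0
  else picnicLoop friend_list case 0
termination_by (case.length, case.length + 1)

def picnicLoop (friend_list : List Int) (case : List Int) (i : Nat) : Int :=
  if _h : i < case.length then
    (if case.getD i 0 ∈ friend_list ∧ case.getD (i + 1) 0 ∈ friend_list then
       picnic (PySem.Set.diff (PySem.Set.ofList friend_list) [case.getD i 0, case.getD (i + 1) 0])
              (case.drop (i + 2))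
     else 0)
    + picnicLoop friend_list case (i + 2)
  else 0
termination_by (case.length, case.length - i)
end
-- ===== PORT B =====
-- [(case[i], case[i+1]) for i in range(0, len(case) - 1, 2)]: two elements at a time
def pvPairs (case : List Int) : List (Int × Int) :=
  match case with
  | a :: b :: t => (a, b) :: pvPairs t
  | _ => []

-- tuple(sorted(set(friend_list)))
def pvCanon (friend_list : List Int) : List Int :=
  PySem.List.sorted (PySem.Set.ofList friend_list) (fun x => x) false

-- tuple(x for x in s if x != a and x != b)
def pvRm (s : List Int) (a b : Int) : List Int :=
  s.filter (fun x => x != a && x != b)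

-- new[k] = new.get(k, 0) + c
def pvBump (d : PySem.Dict (List Int) Int) (k : List Int) (c : Int) : PySem.Dict (List Int) Int :=
  d.insert k (d.getD k 0 + c)

-- the body of 'for s, c in states.items(): …' building the dict 'new'
def pvStepF (p : Int × Int) (new : PySem.Dict (List Int) Int) (sc : List Int × Int) :
    PySem.Dict (List Int) Int :=
  let new' := pvBump new sc.1 sc.2
  if p.1 ∈ sc.1 ∧ p.2 ∈ sc.1 then pvBump new' (pvRm sc.1 p.1 p.2) sc.2 else new'

def pvStep (states : PySem.Dict (List Int) Int) (p : Int × Int) : PySem.Dict (List Int) Int :=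
  states.items.foldl (pvStepF p) PySem.Dict.empty

def picnic_alt (friend_list : List Int) (case : List Int) : Int :=
  ((pvPairs case).foldl pvStep (PySem.Dict.empty.insert (pvCanon friend_list) 1)).getD [] 0

-- ===== PRECONDITION & SPEC =====
-- Pre_picnic excludes exactly the inputs on which A raises IndexError: an odd-length
-- case whose last element is still a friend (the top-level loop then reads case[i+1]
-- past the end).
def Pre_picnic (friend_list : List Int) (case : List Int) : Prop :=
  case.length % 2 = 0 ∨ friend_list = [] ∨ case.getLast?.getD 0 ∉ friend_list
instance (friend_list : List Int) (case : List Int) : Decidable (Pre_picnic friend_list case) := by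
  unfold Pre_picnic; infer_instance

def pvWitness_picnic : List Int × List Int := ([1, 2], [1, 2])

def Spec_picnic (friend_list : List Int) (case : List Int) (out : Int) : Prop := out = picnic_alt friend_list case
instance (friend_list : List Int) (case : List Int) (out : Int) : Decidable (Spec_picnic friend_list case out) := by unfold Spec_picnic; infer_instance

-- ===== CLAIM (what is proved, stated in full; the proofs are below) =====
def Claim_equal_picnic : Prop := ∀ (friend_list : List Int) (case : List Int), Dom_picnic friend_list case → Pre_picnic friend_list case → Spec_picnic friend_list case (picnic friend_list case)

-- ===== LEMMAS AND PROOFS =====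

def pvR (S : Finset Int) : List (Int × Int) → Int
  | [] => if S = ∅ then 1 else 0
  | p :: ps =>
      if S = ∅ then 1
      else (if p.1 ∈ S ∧ p.2 ∈ S then pvR (S.filter (fun x => x ≠ p.1 ∧ x ≠ p.2)) ps else 0)
           + pvR S ps

lemma pvR_empty (ps : List (Int × Int)) : pvR ∅ ps = 1 := by
  cases ps <;> simp [pvR]

lemma pvR_cons (S : Finset Int) (a b : Int) (ps : List (Int × Int)) :
    pvR S ((a, b) :: ps) =
      (if a ∈ S ∧ b ∈ S then pvR (S.filter (fun x => x ≠ a ∧ x ≠ b)) ps else 0) + pvR S ps := by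
  by_cases h : S = ∅
  · subst h; simp [pvR_empty, pvR]
  · simp [pvR, h]

def pvH (friend_list : List Int) (case : List Int) : Prop :=
  case.length % 2 = 1 → case.getLast?.getD 0 ∉ friend_list

lemma pvDiff_toFinset (fl : List Int) (a b : Int) :
    (PySem.Set.diff (PySem.Set.ofList fl) [a, b]).toFinset
      = fl.toFinset.filter (fun x => x ≠ a ∧ x ≠ b) := by
  ext x
  simp [PySem.Set.mem_diff, PySem.Set.mem_ofList]

lemma pvA_eq (n : Nat) :
    ∀ fl case, case.length ≤ n → pvH fl case →
      picnic fl case = pvR fl.toFinset (pvPairs case) := by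
  induction n with
  | zero =>
    intro fl case hlen _
    have hc : case = [] := List.eq_nil_of_length_eq_zero (by omega)
    subst hc
    rw [picnic]
    by_cases hfl : fl.length = 0
    · have : fl = [] := List.eq_nil_of_length_eq_zero hfl
      subst this
      simp [pvPairs, pvR]
    · have : fl.toFinset ≠ ∅ := by
        rw [Ne, List.toFinset_eq_empty_iff]
        intro h; exact hfl (by simp [h])
      simp [pvPairs, pvR, this, hfl]
  | succ n ihn =>
    have loop : ∀ (j i : Nat) (fl case : List Int), case.length ≤ n + 1 →
        case.length - i ≤ j → i % 2 = 0 → fl.toFinset ≠ ∅ → pvH fl case →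
        picnicLoop fl case i = pvR fl.toFinset (pvPairs (case.drop i)) := by
      intro j
      induction j with
      | zero =>
        intro i fl case _ hj _ hS _
        rw [picnicLoop, dif_neg (by omega)]
        rw [List.drop_eq_nil_of_le (by omega)]
        simp [pvPairs, pvR, hS]
      | succ j ihj =>
        intro i fl case hlen hj hi hS hH
        rw [picnicLoop]
        by_cases hlt : i < case.length
        · rw [dif_pos hlt]
          by_cases hlt2 : i + 1 < case.length
          · -- full pair at i
            have hdrop : case.drop i = case[i] :: case[i+1] :: case.drop (i+2) := by
              rw [List.drop_eq_getElem_cons hlt, List.drop_eq_getElem_cons hlt2]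
            have hgi : case.getD i 0 = case[i] := List.getD_eq_getElem case 0 hlt
            have hgi1 : case.getD (i+1) 0 = case[i+1] := List.getD_eq_getElem case 0 hlt2
            have hrest : picnicLoop fl case (i + 2)
                = pvR fl.toFinset (pvPairs (case.drop (i + 2))) :=
              ihj (i+2) fl case hlen (by omega) (by omega) hS hH
            rw [hdrop]
            show _ = pvR fl.toFinset (pvPairs (case[i] :: case[i+1] :: case.drop (i+2)))
            have hpp : pvPairs (case[i] :: case[i+1] :: case.drop (i+2))
                = (case[i], case[i+1]) :: pvPairs (case.drop (i+2)) := rfl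
            rw [hpp, pvR_cons, hrest, hgi, hgi1]
            congr 1
            -- the taken-pair term
            have hmemiff : (case[i] ∈ fl.toFinset ∧ case[i+1] ∈ fl.toFinset)
                ↔ (case[i] ∈ fl ∧ case[i+1] ∈ fl) := by simp
            by_cases hv : case[i] ∈ fl ∧ case[i+1] ∈ fl
            · rw [if_pos hv, if_pos (hmemiff.mpr hv)]
              set fl' := PySem.Set.diff (PySem.Set.ofList fl) [case[i], case[i+1]] with hfl'
              have hsub : ∀ x, x ∈ fl' → x ∈ fl := by
                intro x hx
                rw [hfl', PySem.Set.mem_diff] at hx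
                exact (PySem.Set.mem_ofList fl x).mp hx.1
              have hH' : pvH fl' (case.drop (i+2)) := by
                intro hodd
                rw [List.length_drop] at hodd
                rw [List.getLast?_drop, if_neg (by omega)]
                intro hmem
                exact hH (by omega) (hsub _ hmem)
              have := ihn fl' (case.drop (i+2)) (by rw [List.length_drop]; omega) hH'
              rw [this, pvDiff_toFinset]
            · rw [if_neg hv, if_neg (fun h => hv (hmemiff.mp h))]
          · -- trailing unpaired element: i = case.length - 1
            have hieq : i + 1 = case.length := by omega
            have hodd : case.length % 2 = 1 := by omega
            have hlast : case.getLast?.getD 0 = case[i] := by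
              rw [List.getLast?_eq_getElem?, show case.length - 1 = i by omega,
                  List.getElem?_eq_getElem hlt]
              rfl
            have hni : case.getD i 0 ∉ fl := by
              rw [List.getD_eq_getElem case 0 hlt, ← hlast]
              exact hH hodd
            rw [if_neg (fun h => hni h.1)]
            have hrest : picnicLoop fl case (i + 2)
                = pvR fl.toFinset (pvPairs (case.drop (i + 2))) :=
              ihj (i+2) fl case hlen (by omega) (by omega) hS hH
            rw [hrest, List.drop_eq_nil_of_le (by omega),
                List.drop_eq_getElem_cons hlt, List.drop_eq_nil_of_le (by omega)]
            simp [pvPairs, pvR, hS]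
        · rw [dif_neg hlt]
          rw [List.drop_eq_nil_of_le (by omega)]
          simp [pvPairs, pvR, hS]
    intro fl case hlen hH
    rw [picnic]
    by_cases hfl : fl.length = 0
    · have : fl = [] := List.eq_nil_of_length_eq_zero hfl
      subst this
      simp [pvR_empty]
    · have hS : fl.toFinset ≠ ∅ := by
        rw [Ne, List.toFinset_eq_empty_iff]
        intro h; exact hfl (by simp [h])
      by_cases hc : case.length = 0
      · have : case = [] := List.eq_nil_of_length_eq_zero hc
        subst this
        simp [pvPairs, pvR, hS, hfl]
      · rw [if_neg hfl, if_neg hc]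
        have := loop case.length 0 fl case hlen (by omega) (by omega) hS hH
        rw [this, List.drop_zero]


-- ---- B side ----

def pvSum (d : PySem.Dict (List Int) Int) (f : List Int → Int) : Int :=
  (d.items.map (fun kc => kc.2 * f kc.1)).sum

lemma pvMapIf_id (t : List (List Int × Int)) (k : List Int) (w : Int)
    (h : ∀ q ∈ t, q.1 ≠ k) :
    t.map (fun p => if p.1 == k then (k, w) else p) = t := by
  induction t with
  | nil => rfl
  | cons p t ih =>
    have h1 : (p.1 == k) = false := by simpa using h p (by simp)
    rw [List.map_cons, h1, ih (fun q hq => h q (by simp [hq]))]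
    simp

lemma pvSum_items_update (l : List (List Int × Int)) (k : List Int) (v w : Int)
    (f : List Int → Int) (hnd : (l.map Prod.fst).Nodup) (hk : (k, v) ∈ l) :
    ((l.map (fun p => if p.1 == k then (k, w) else p)).map (fun kc => kc.2 * f kc.1)).sum
      = (l.map (fun kc => kc.2 * f kc.1)).sum - v * f k + w * f k := by
  induction l with
  | nil => simp at hk
  | cons p t ih =>
    simp only [List.map_cons, List.nodup_cons, List.mem_map] at hnd
    by_cases hpk : p.1 = k
    · have hpv : p = (k, v) := by
        rcases List.mem_cons.mp hk with h | h
        · exact h.symm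
        · exact absurd ⟨(k, v), h, by simp [hpk]⟩ hnd.1
      have ht : ∀ q ∈ t, q.1 ≠ k := by
        intro q hq hqk
        exact hnd.1 ⟨q, hq, by simp [hqk, hpk]⟩
      have hb : (p.1 == k) = true := by simp [hpk]
      rw [List.map_cons, hb, List.map_cons, List.sum_cons, pvMapIf_id t k w ht,
          List.map_cons, List.sum_cons, hpv]
      simp
      ring
    · have hk' : (k, v) ∈ t := by
        rcases List.mem_cons.mp hk with h | h
        · exact absurd (congrArg Prod.fst h.symm) hpk
        · exact h
      simp only [List.map_cons]
      rw [if_neg (by simp [hpk])]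
      simp only [List.sum_cons]
      rw [ih hnd.2 hk']
      ring

lemma pvSum_bump (d : PySem.Dict (List Int) Int) (k : List Int) (c : Int)
    (f : List Int → Int) (hnd : d.keys.Nodup) :
    pvSum (pvBump d k c) f = pvSum d f + c * f k := by
  unfold pvSum pvBump
  by_cases hc : d.contains k
  · obtain ⟨v, hv⟩ : ∃ v, d.get? k = some v := by
      cases h : d.get? k with
      | none => exact absurd ((PySem.Dict.get?_eq_none_iff_contains d k).mp h) (by simp [hc])
      | some v => exact ⟨v, rfl⟩
    have hgetD : d.getD k 0 = v := by rw [PySem.Dict.getD_eq_get?_getD, hv]; rfl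
    rw [PySem.Dict.items_insert_of_contains d _ hc]
    have hmem : (k, v) ∈ d.items := PySem.Dict.mem_items_of_get?_eq_some d hv
    have hnd' : (d.items.map Prod.fst).Nodup := by
      simpa [PySem.Dict.keys] using hnd
    rw [pvSum_items_update d.items k v (d.getD k 0 + c) f hnd' hmem, hgetD]
    ring
  · rw [PySem.Dict.items_insert_of_not_contains d _ (by simpa using hc),
        PySem.Dict.getD_of_not_contains d _ (by simpa using hc)]
    simp

lemma pvStepF_eq (p : Int × Int) (d : PySem.Dict (List Int) Int) (sc : List Int × Int) :
    pvStepF p d sc = if p.1 ∈ sc.1 ∧ p.2 ∈ sc.1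
      then pvBump (pvBump d sc.1 sc.2) (pvRm sc.1 p.1 p.2) sc.2
      else pvBump d sc.1 sc.2 := rfl

lemma pvBump_nodup (d : PySem.Dict (List Int) Int) (k : List Int) (c : Int)
    (hnd : d.keys.Nodup) : (pvBump d k c).keys.Nodup :=
  PySem.Dict.nodup_keys_insert d k _ hnd

lemma pvStepBody_nodup (p : Int × Int) (l : List (List Int × Int)) :
    ∀ d : PySem.Dict (List Int) Int, d.keys.Nodup →
      (l.foldl (pvStepF p) d).keys.Nodup := by
  induction l with
  | nil => intro d hd; simpa using hd
  | cons sc t ih =>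
    intro d hd
    rw [List.foldl_cons, pvStepF_eq]
    apply ih
    by_cases hv : p.1 ∈ sc.1 ∧ p.2 ∈ sc.1
    · rw [if_pos hv]
      exact pvBump_nodup _ _ _ (pvBump_nodup _ _ _ hd)
    · rw [if_neg hv]
      exact pvBump_nodup _ _ _ hd
  
lemma pvStep_nodup (d : PySem.Dict (List Int) Int) (p : Int × Int) :
    (pvStep d p).keys.Nodup := by
  unfold pvStep
  exact pvStepBody_nodup p d.items PySem.Dict.empty (by simp [PySem.Dict.keys, PySem.Dict.empty])

lemma pvStepBody_sum (p : Int × Int) (f : List Int → Int) (l : List (List Int × Int)) :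
    ∀ d : PySem.Dict (List Int) Int, d.keys.Nodup →
      pvSum (l.foldl (pvStepF p) d) f
        = pvSum d f
          + (l.map (fun sc => sc.2 * f sc.1
              + if p.1 ∈ sc.1 ∧ p.2 ∈ sc.1 then sc.2 * f (pvRm sc.1 p.1 p.2) else 0)).sum := by
  induction l with
  | nil => intro d hd; simp
  | cons sc t ih =>
    intro d hd
    rw [List.foldl_cons, pvStepF_eq, List.map_cons, List.sum_cons]
    by_cases hv : p.1 ∈ sc.1 ∧ p.2 ∈ sc.1
    · rw [if_pos hv, if_pos hv,
          ih _ (pvBump_nodup _ _ _ (pvBump_nodup _ _ _ hd)),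
          pvSum_bump _ _ _ _ (pvBump_nodup _ _ _ hd), pvSum_bump _ _ _ _ hd]
      ring
    · rw [if_neg hv, if_neg hv, ih _ (pvBump_nodup _ _ _ hd), pvSum_bump _ _ _ _ hd]
      ring

lemma pvStep_sum (d : PySem.Dict (List Int) Int) (p : Int × Int) (f : List Int → Int) :
    pvSum (pvStep d p) f
      = pvSum d (fun s => f s + if p.1 ∈ s ∧ p.2 ∈ s then f (pvRm s p.1 p.2) else 0) := by
  unfold pvStep
  rw [pvStepBody_sum p f d.items PySem.Dict.empty (by simp [PySem.Dict.keys, PySem.Dict.empty])]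
  unfold pvSum
  have hpt : ∀ sc : List Int × Int,
      sc.2 * (f sc.1 + if p.1 ∈ sc.1 ∧ p.2 ∈ sc.1 then f (pvRm sc.1 p.1 p.2) else 0)
        = sc.2 * f sc.1 + (if p.1 ∈ sc.1 ∧ p.2 ∈ sc.1 then sc.2 * f (pvRm sc.1 p.1 p.2) else 0) := by
    intro sc; by_cases hv : p.1 ∈ sc.1 ∧ p.2 ∈ sc.1 <;> simp [hv]; ring
  calc (PySem.Dict.empty.items.map (fun kc => kc.2 * f kc.1)).sum
        + (d.items.map (fun sc => sc.2 * f sc.1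
            + if p.1 ∈ sc.1 ∧ p.2 ∈ sc.1 then sc.2 * f (pvRm sc.1 p.1 p.2) else 0)).sum
      = (d.items.map (fun sc => sc.2 * f sc.1
            + if p.1 ∈ sc.1 ∧ p.2 ∈ sc.1 then sc.2 * f (pvRm sc.1 p.1 p.2) else 0)).sum := by
        simp [PySem.Dict.empty]
    _ = (d.items.map (fun kc => kc.2 * (f kc.1
            + if p.1 ∈ kc.1 ∧ p.2 ∈ kc.1 then f (pvRm kc.1 p.1 p.2) else 0))).sum := by
        rw [List.map_congr_left (fun sc _ => (hpt sc).symm)]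

lemma pvIndicator_of_mem (l : List (List Int × Int)) (v : Int)
    (hnd : (l.map Prod.fst).Nodup) (hm : (([] : List Int), v) ∈ l) :
    (l.map (fun kc => kc.2 * (if kc.1 = ([] : List Int) then 1 else 0))).sum = v := by
  induction l with
  | nil => simp at hm
  | cons p t ih =>
    simp only [List.map_cons, List.nodup_cons, List.mem_map] at hnd
    rcases List.mem_cons.mp hm with h | h
    · have ht : ∀ q ∈ t, q.1 ≠ ([] : List Int) := by
        intro q hq hqe
        exact hnd.1 ⟨q, hq, by rw [hqe, ← h]⟩
      have hz : ∀ q ∈ t, q.2 * (if q.1 = ([] : List Int) then 1 else 0) = (fun _ => (0 : Int)) q := by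
        intro q hq; rw [if_neg (ht q hq)]; ring
      rw [List.map_cons, List.sum_cons, ← h, List.map_congr_left hz]
      simp
    · have hp : p.1 ≠ ([] : List Int) := by
        intro hpe
        exact hnd.1 ⟨([], v), h, by rw [hpe]⟩
      rw [List.map_cons, List.sum_cons, if_neg hp, ih hnd.2 h]
      ring

lemma pvIndicator_of_not_mem (l : List (List Int × Int))
    (hm : ∀ q ∈ l, q.1 ≠ ([] : List Int)) :
    (l.map (fun kc => kc.2 * (if kc.1 = ([] : List Int) then 1 else 0))).sum = 0 := by
  have : ∀ q ∈ l, q.2 * (if q.1 = ([] : List Int) then 1 else 0) = 0 := by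
    intro q hq; rw [if_neg (hm q hq)]; ring
  rw [List.map_congr_left this]
  simp

lemma pvSum_indicator (d : PySem.Dict (List Int) Int) (hnd : d.keys.Nodup) :
    pvSum d (fun s => if s = ([] : List Int) then 1 else 0) = d.getD [] 0 := by
  unfold pvSum
  rw [PySem.Dict.getD_eq_get?_getD]
  cases h : d.get? [] with
  | some v =>
    exact pvIndicator_of_mem d.items v (by simpa [PySem.Dict.keys] using hnd)
      (PySem.Dict.mem_items_of_get?_eq_some d h)
  | none =>
    have hk : ([] : List Int) ∉ d.keys := (PySem.Dict.get?_eq_none_iff_not_mem_keys d []).mp h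
    refine pvIndicator_of_not_mem d.items ?_
    intro q hq hqe
    refine hk ?_
    rw [← hqe]
    simp only [PySem.Dict.keys]
    exact List.mem_map_of_mem hq

lemma pvRm_toFinset (s : List Int) (a b : Int) :
    (pvRm s a b).toFinset = s.toFinset.filter (fun x => x ≠ a ∧ x ≠ b) := by
  unfold pvRm
  ext x
  simp

lemma pvFold_sum (ps : List (Int × Int)) :
    ∀ d : PySem.Dict (List Int) Int, d.keys.Nodup →
      (ps.foldl pvStep d).getD [] 0 = pvSum d (fun s => pvR s.toFinset ps) := by
  induction ps with
  | nil =>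
    intro d hnd
    rw [List.foldl_nil, ← pvSum_indicator d hnd]
    unfold pvSum
    refine congrArg List.sum (List.map_congr_left ?_)
    intro kc _
    simp only [pvR, List.toFinset_eq_empty_iff]
  | cons p ps ih =>
    intro d hnd
    obtain ⟨a, b⟩ := p
    rw [List.foldl_cons, ih (pvStep d (a, b)) (pvStep_nodup d (a, b)), pvStep_sum]
    unfold pvSum
    refine congrArg List.sum (List.map_congr_left ?_)
    intro kc _
    have : pvR kc.1.toFinset ((a, b) :: ps)
        = pvR kc.1.toFinset ps
          + if a ∈ kc.1 ∧ b ∈ kc.1 then pvR (pvRm kc.1 a b).toFinset ps else 0 := by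
      rw [pvR_cons, pvRm_toFinset]
      have hmem : (a ∈ kc.1.toFinset ∧ b ∈ kc.1.toFinset) ↔ (a ∈ kc.1 ∧ b ∈ kc.1) := by
        simp
      by_cases hv : a ∈ kc.1 ∧ b ∈ kc.1
      · rw [if_pos (hmem.mpr hv), if_pos hv]; ring
      · rw [if_neg (fun h => hv (hmem.mp h)), if_neg hv]; ring
    show kc.2 * (pvR kc.1.toFinset ps
        + if a ∈ kc.1 ∧ b ∈ kc.1 then pvR (pvRm kc.1 a b).toFinset ps else 0)
      = kc.2 * pvR kc.1.toFinset ((a, b) :: ps)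
    rw [this]

lemma pvCanon_toFinset (fl : List Int) : (pvCanon fl).toFinset = fl.toFinset := by
  unfold pvCanon
  rw [List.toFinset_eq_of_perm _ _ (PySem.List.sorted_perm (PySem.Set.ofList fl) (fun x => x) false)]
  ext x
  simp [PySem.Set.mem_ofList]

lemma pvB_eq (fl case : List Int) :
    picnic_alt fl case = pvR fl.toFinset (pvPairs case) := by
  unfold picnic_alt
  have hnd : (PySem.Dict.empty.insert (pvCanon fl) (1 : Int)).keys.Nodup :=
    PySem.Dict.nodup_keys_insert _ _ _ (by simp [PySem.Dict.keys, PySem.Dict.empty])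
  rw [pvFold_sum (pvPairs case) _ hnd]
  unfold pvSum
  rw [PySem.Dict.items_insert_of_not_contains _ _ (PySem.Dict.contains_empty _)]
  simp [PySem.Dict.empty, pvCanon_toFinset]

-- ===== VERDICT (by name: the statement is the Claim_ definition above) =====
theorem picnic_spec : Claim_equal_picnic := by
  intro fl case _ hpre
  unfold Spec_picnic
  rw [pvB_eq]
  refine pvA_eq case.length fl case le_rfl ?_
  intro hodd
  rcases hpre with h | h | h
  · omega
  · subst h; simp
  · exact h
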